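-- pv_equiv track=rewrite | github.com/wannastudyhardyeah/Problem-Solving-list | BOJ/2023/05_MAY/20230513/1193.py | progress
-- ===== SOURCE A (Python) =====
-- def progress(now_pos, now_id, e_or_o, goal, ):
--     """
--     now_pos:    현재 좌표
--     now_id:     현재 인덱스
--     e_or_o:     0 if even, 1 elses
--     goal:       도착 목표로 하는 인덱스
--     """
--     if (e_or_o == 0):
--         for i in range(now_id - goal):
--             now_pos[0] -= 1
--             now_pos[1] += 1
--     else:
--         for i in range(now_id - goal):
--             now_pos[0] += 1
--             now_pos[1] -= 1
--     return now_pos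
-- ===== SOURCE B (Python) =====
-- def progress(now_pos, now_id, e_or_o, goal):
--     k = now_id - goal
--     if k > 0:
--         d = k if e_or_o != 0 else -k
--         now_pos[0] += d
--         now_pos[1] -= d
--     return now_pos
-- ===== Notes on version B (the rewrite author's own statement) =====
-- stated objective: simpler
-- what changed: Replaces the per-step loop of unit increments with a single closed-form update: compute the step count once and add/subtract it in one arithmetic operation.
import Mathlib
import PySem

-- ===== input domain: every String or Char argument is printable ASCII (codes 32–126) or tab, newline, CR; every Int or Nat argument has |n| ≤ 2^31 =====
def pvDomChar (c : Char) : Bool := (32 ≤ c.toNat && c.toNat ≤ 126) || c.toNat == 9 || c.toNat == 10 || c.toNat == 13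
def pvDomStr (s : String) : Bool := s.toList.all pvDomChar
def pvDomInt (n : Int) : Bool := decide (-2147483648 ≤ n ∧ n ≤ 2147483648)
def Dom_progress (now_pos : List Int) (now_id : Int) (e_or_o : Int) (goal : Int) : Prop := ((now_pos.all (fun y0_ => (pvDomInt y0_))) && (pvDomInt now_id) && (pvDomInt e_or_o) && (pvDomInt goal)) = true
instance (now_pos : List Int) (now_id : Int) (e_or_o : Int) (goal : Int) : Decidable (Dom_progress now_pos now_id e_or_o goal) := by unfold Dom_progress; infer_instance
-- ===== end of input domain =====

-- B replaces A's per-unit-step loop with a single closed-form arithmetic update (simpler; same measured cost here);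
-- A mutates now_pos in place (B does the same in Python); the equivalence proved is about the return value.


-- ===== PORT A =====
-- loop body of 'now_pos[0] -= 1; now_pos[1] += 1' (pyGetD/pySetD are exact under Pre_, which puts 0 and 1 in range whenever the loop runs)
def progressStepDown (p : List Int) : List Int :=
  let p1 := PySem.List.pySetD p 0 (PySem.List.pyGetD p 0 0 - 1)
  PySem.List.pySetD p1 1 (PySem.List.pyGetD p1 1 0 + 1)

def progressStepUp (p : List Int) : List Int :=
  let p1 := PySem.List.pySetD p 0 (PySem.List.pyGetD p 0 0 + 1)
  PySem.List.pySetD p1 1 (PySem.List.pyGetD p1 1 0 - 1)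

def progress (now_pos : List Int) (now_id : Int) (e_or_o : Int) (goal : Int) : List Int :=
  if e_or_o = 0 then
    (PySem.List.pyRange 0 (now_id - goal) 1).foldl (fun p _ => progressStepDown p) now_pos
  else
    (PySem.List.pyRange 0 (now_id - goal) 1).foldl (fun p _ => progressStepUp p) now_pos

-- ===== PORT B =====
def progress_alt (now_pos : List Int) (now_id : Int) (e_or_o : Int) (goal : Int) : List Int :=
  let k := now_id - goal
  if 0 < k then
    let d := if e_or_o ≠ 0 then k else -k
    let p1 := PySem.List.pySetD now_pos 0 (PySem.List.pyGetD now_pos 0 0 + d)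
    PySem.List.pySetD p1 1 (PySem.List.pyGetD p1 1 0 - d)
  else now_pos

-- ===== PRECONDITION & SPEC =====
-- Pre_ excludes exactly the inputs where the Python A raises IndexError: a positive step count with fewer than two coordinates.
def Pre_progress (now_pos : List Int) (now_id : Int) (e_or_o : Int) (goal : Int) : Prop :=
  0 < now_id - goal → 2 ≤ now_pos.length
instance (now_pos : List Int) (now_id : Int) (e_or_o : Int) (goal : Int) : Decidable (Pre_progress now_pos now_id e_or_o goal) := by unfold Pre_progress; infer_instance

def pvWitness_progress : List Int × Int × Int × Int := ([0, 0], 3, 0, 1)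

def Spec_progress (now_pos : List Int) (now_id : Int) (e_or_o : Int) (goal : Int) (out : List Int) : Prop := out = progress_alt now_pos now_id e_or_o goal
instance (now_pos : List Int) (now_id : Int) (e_or_o : Int) (goal : Int) (out : List Int) : Decidable (Spec_progress now_pos now_id e_or_o goal out) := by unfold Spec_progress; infer_instance

-- ===== CLAIM (what is proved, stated in full; the proofs are below) =====
def Claim_equal_progress : Prop := ∀ (now_pos : List Int) (now_id : Int) (e_or_o : Int) (goal : Int), Dom_progress now_pos now_id e_or_o goal → Pre_progress now_pos now_id e_or_o goal → Spec_progress now_pos now_id e_or_o goal (progress now_pos now_id e_or_o goal)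

-- ===== LEMMAS AND PROOFS =====
theorem stepDown_cons (a b : Int) (rest : List Int) :
    progressStepDown (a :: b :: rest) = (a - 1) :: (b + 1) :: rest := by
  simp [progressStepDown, pysem]

theorem stepUp_cons (a b : Int) (rest : List Int) :
    progressStepUp (a :: b :: rest) = (a + 1) :: (b - 1) :: rest := by
  simp [progressStepUp, pysem]

theorem loopDown (n : Nat) (a b : Int) (rest : List Int) :
    (PySem.List.pyRange 0 (n : Int) 1).foldl (fun p _ => progressStepDown p) (a :: b :: rest)
      = (a - n) :: (b + n) :: rest := by
  induction n generalizing a b with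
  | zero => simp [PySem.List.pyRange_one_eq_nil]
  | succ m ih =>
    rw [show ((m + 1 : Nat) : Int) = (m : Int) + 1 by push_cast; ring,
        PySem.List.pyRange_one_succ_right (by positivity), List.foldl_append]
    simp only [List.foldl_cons, List.foldl_nil, ih, stepDown_cons]
    ring_nf

theorem loopUp (n : Nat) (a b : Int) (rest : List Int) :
    (PySem.List.pyRange 0 (n : Int) 1).foldl (fun p _ => progressStepUp p) (a :: b :: rest)
      = (a + n) :: (b - n) :: rest := by
  induction n generalizing a b with
  | zero => simp [PySem.List.pyRange_one_eq_nil]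
  | succ m ih =>
    rw [show ((m + 1 : Nat) : Int) = (m : Int) + 1 by push_cast; ring,
        PySem.List.pyRange_one_succ_right (by positivity), List.foldl_append]
    simp only [List.foldl_cons, List.foldl_nil, ih, stepUp_cons]
    ring_nf

theorem alt_cons (a b : Int) (rest : List Int) (now_id e_or_o goal : Int) (h : 0 < now_id - goal) :
    progress_alt (a :: b :: rest) now_id e_or_o goal
      = (a + (if e_or_o ≠ 0 then now_id - goal else -(now_id - goal)))
        :: (b - (if e_or_o ≠ 0 then now_id - goal else -(now_id - goal))) :: rest := by
  simp [progress_alt, pysem, show goal < now_id by omega]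

-- ===== VERDICT (by name: the statement is the Claim_ definition above) =====
theorem progress_spec : Claim_equal_progress := by
  intro now_pos now_id e_or_o goal _ hpre
  unfold Spec_progress
  by_cases hk : 0 < now_id - goal
  · obtain ⟨a, b, rest, rfl⟩ : ∃ a b rest, now_pos = a :: b :: rest := by
      match now_pos, hpre hk with
      | a :: b :: rest, _ => exact ⟨a, b, rest, rfl⟩
    have hn : now_id - goal = ((now_id - goal).toNat : Int) := by omega
    rw [alt_cons a b rest now_id e_or_o goal hk]
    unfold progress
    by_cases he : e_or_o = 0
    · rw [if_pos he, hn, loopDown]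
      simp [he]
      omega
    · rw [if_neg he, hn, loopUp]
      simp [he]
  · have hnil : PySem.List.pyRange 0 (now_id - goal) 1 = [] :=
      PySem.List.pyRange_one_eq_nil (by omega)
    unfold progress progress_alt
    simp [hnil, show ¬ goal < now_id by omega]
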